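-- pv_equiv track=rewrite | github.com/mikoavelli/AOIS | lab1/main.py | to_binary_reverse
-- ===== SOURCE A (Python) =====
-- NUMBER_OF_BINARY_DIGITS: int = 16
--
-- def to_binary(num: int, number_of_binary_digits: int = NUMBER_OF_BINARY_DIGITS) -> str:
--     local_num: int = num
--     result: str = ''
--
--     while local_num > 0:
--         result = str(local_num % 2) + result
--         local_num //= 2
--
--     return result.zfill(number_of_binary_digits)
--
-- def to_binary_reverse(num: int, number_of_binary_digits: int = NUMBER_OF_BINARY_DIGITS) -> str:
--     binary_num: str = to_binary(abs(num), number_of_binary_digits)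
--
--     if num >= 0:
--         return binary_num
--
--     result: str = ''
--     for el in binary_num:
--         result += '1' if el == '0' else '0'
--     return result
-- ===== SOURCE B (Python) =====
-- NUMBER_OF_BINARY_DIGITS: int = 16
--
-- def to_binary_reverse(num: int, number_of_binary_digits: int = NUMBER_OF_BINARY_DIGITS) -> str:
--     mag = abs(num)
--     if mag == 0:
--         return '0' * number_of_binary_digits
--     length = max(number_of_binary_digits, mag.bit_length())
--     value = mag if num >= 0 else (1 << length) - 1 - mag
--     return format(value, 'b').zfill(length)
-- ===== Notes on version B (the rewrite author's own statement) =====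
-- stated objective: alternative
-- what changed: A flips the ones-complement character by character in a Python loop; B computes the complement in closed form as the integer (1 << length) - 1 - abs(num) and formats it in binary once, with the padding width taken as max(width, bit_length).
import Mathlib
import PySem

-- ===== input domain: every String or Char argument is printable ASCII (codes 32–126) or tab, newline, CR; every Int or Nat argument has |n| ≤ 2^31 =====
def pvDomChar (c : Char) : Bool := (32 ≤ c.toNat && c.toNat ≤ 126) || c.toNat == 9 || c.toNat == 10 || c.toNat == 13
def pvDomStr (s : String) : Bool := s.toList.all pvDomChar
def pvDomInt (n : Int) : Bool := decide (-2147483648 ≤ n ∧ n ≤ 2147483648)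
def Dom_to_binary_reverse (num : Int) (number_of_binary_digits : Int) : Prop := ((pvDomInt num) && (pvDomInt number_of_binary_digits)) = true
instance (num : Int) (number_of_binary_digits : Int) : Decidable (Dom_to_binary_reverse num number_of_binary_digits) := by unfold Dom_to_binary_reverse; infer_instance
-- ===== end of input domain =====

-- B replaces A's per-character ones-complement flip loop by closed-form integer arithmetic
-- ((1 << length) - 1 - mag formatted in binary); objective: alternative algorithm.

-- ===== PORT A =====
-- the 'while local_num > 0' loop of to_binary
def pvBinLoopA (local_num : Int) (result : List Char) : List Char :=
  if 0 < local_num then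
    pvBinLoopA (PySem.Int.floordiv local_num 2)
      (PySem.Int.toChars (PySem.Int.mod local_num 2) ++ result)
  else result
termination_by local_num.toNat
decreasing_by
  rw [PySem.Int.floordiv_eq_ediv_of_pos (by norm_num)]
  omega

-- to_binary(num, number_of_binary_digits)
def pvToBinary (num : Int) (number_of_binary_digits : Int) : List Char :=
  PySem.Chars.zfill (pvBinLoopA num []) number_of_binary_digits

def to_binary_reverse (num : Int) (number_of_binary_digits : Int) : String :=
  let binary_num : List Char := pvToBinary |num| number_of_binary_digits
  if 0 ≤ num then String.mk binary_num
  else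
    String.mk (binary_num.foldl (fun result el => result ++ [if el == '0' then '1' else '0']) [])

-- ===== PORT B =====
def to_binary_reverse_alt (num : Int) (number_of_binary_digits : Int) : String :=
  let mag : Int := |num|
  if mag = 0 then String.mk (List.replicate number_of_binary_digits.toNat '0')
  else
    let length : Int := max number_of_binary_digits ((PySem.Int.bitLength mag : Nat) : Int)
    -- 'length' is ≥ 1 here (mag ≠ 0), so Python's '1 << length' never raises; '.toNat' is exact
    let value : Int := if 0 ≤ num then mag else ((1 : Int) <<< length.toNat) - 1 - mag
    String.mk (PySem.Chars.zfill (PySem.Int.toBinChars value) length)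

-- ===== PRECONDITION & SPEC =====
def Spec_to_binary_reverse (num : Int) (number_of_binary_digits : Int) (out : String) : Prop := out = to_binary_reverse_alt num number_of_binary_digits
instance (num : Int) (number_of_binary_digits : Int) (out : String) : Decidable (Spec_to_binary_reverse num number_of_binary_digits out) := by unfold Spec_to_binary_reverse; infer_instance

-- ===== CLAIM (what is proved, stated in full; the proofs are below) =====
def Claim_equal_to_binary_reverse : Prop := ∀ (num : Int) (number_of_binary_digits : Int), Dom_to_binary_reverse num number_of_binary_digits → Spec_to_binary_reverse num number_of_binary_digits (to_binary_reverse num number_of_binary_digits)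

-- ===== LEMMAS AND PROOFS =====

-- canonical binary digits (msb first) of a natural number; [] for 0
def pvBits (n : Nat) : List Char :=
  if h : n = 0 then []
  else pvBits (n / 2) ++ [if n % 2 = 1 then '1' else '0']
termination_by n
decreasing_by exact Nat.div_lt_self (Nat.pos_of_ne_zero h) (by norm_num)

-- format(v, 'b') for v ≥ 0
def pvBinRep (n : Nat) : List Char := if n = 0 then ['0'] else pvBits n

def pvBit (c : Char) : Nat := if c = '1' then 1 else 0

def pvVal (cs : List Char) : Nat := cs.foldl (fun a c => 2 * a + pvBit c) 0

def pvIsBits (cs : List Char) : Prop := ∀ c ∈ cs, c = '0' ∨ c = '1'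

theorem pvVal_from (cs : List Char) : ∀ a : Nat,
    cs.foldl (fun a c => 2 * a + pvBit c) a = a * 2 ^ cs.length + pvVal cs := by
  induction cs with
  | nil => intro a; simp only [List.foldl_nil, pvVal, List.length_nil, pow_zero]; omega
  | cons c cs ih =>
    intro a
    have h3 : pvVal (c :: cs) = (2 * 0 + pvBit c) * 2 ^ cs.length + pvVal cs := by
      show List.foldl _ 0 (c :: cs) = _
      rw [List.foldl_cons]; exact ih _
    rw [List.foldl_cons, ih, List.length_cons, h3]
    ring

theorem pvVal_cons (c : Char) (cs : List Char) :
    pvVal (c :: cs) = pvBit c * 2 ^ cs.length + pvVal cs := by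
  show List.foldl (fun a c => 2 * a + pvBit c) 0 (c :: cs) = _
  rw [List.foldl_cons, pvVal_from]
  ring

theorem pvBit_le_one (c : Char) : pvBit c ≤ 1 := by unfold pvBit; split <;> omega

theorem pvVal_lt (cs : List Char) : pvVal cs < 2 ^ cs.length := by
  induction cs with
  | nil => simp [pvVal]
  | cons c cs ih =>
    have hb : pvBit c * 2 ^ cs.length ≤ 1 * 2 ^ cs.length :=
      Nat.mul_le_mul_right _ (pvBit_le_one c)
    rw [pvVal_cons]
    simp only [List.length_cons, pow_succ]
    omega

theorem pvVal_append (xs ys : List Char) :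
    pvVal (xs ++ ys) = pvVal xs * 2 ^ ys.length + pvVal ys := by
  show List.foldl (fun a c => 2 * a + pvBit c) 0 (xs ++ ys) = _
  rw [List.foldl_append, pvVal_from]
  rfl

theorem pvVal_replicate_zero (p : Nat) : pvVal (List.replicate p '0') = 0 := by
  induction p with
  | zero => simp [pvVal]
  | succ p ih =>
    rw [List.replicate_succ, pvVal_cons, ih]
    simp [pvBit]

theorem pvVal_replicate_one (p : Nat) : pvVal (List.replicate p '1') = 2 ^ p - 1 := by
  induction p with
  | zero => simp [pvVal]
  | succ p ih =>
    rw [List.replicate_succ, pvVal_cons, ih, List.length_replicate]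
    have hb : pvBit '1' = 1 := rfl
    have h1 : 0 < 2 ^ p := pow_pos (by norm_num : (0:Nat) < 2) p
    rw [hb, pow_succ]
    omega

theorem pvBits_unique : ∀ cs ds : List Char, pvIsBits cs → pvIsBits ds →
    cs.length = ds.length → pvVal cs = pvVal ds → cs = ds := by
  intro cs
  induction cs with
  | nil => intro ds _ _ hlen _; cases ds with
    | nil => rfl
    | cons d ds => simp at hlen
  | cons c cs ih =>
    intro ds hb hb' hlen hval
    cases ds with
    | nil => simp at hlen
    | cons d ds =>
      simp only [List.length_cons] at hlen
      have hlen' : cs.length = ds.length := by omega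
      rw [pvVal_cons, pvVal_cons, hlen'] at hval
      have h1 := pvVal_lt cs
      have h2 := pvVal_lt ds
      rw [hlen'] at h1
      have hc := hb c (by simp)
      have hd := hb' d (by simp)
      have hcd : c = d ∧ pvVal cs = pvVal ds := by
        rcases hc with rfl | rfl <;> rcases hd with rfl | rfl
        · exact ⟨rfl, by simp [pvBit] at hval; omega⟩
        · exfalso; simp [pvBit] at hval; omega
        · exfalso; simp [pvBit] at hval; omega
        · exact ⟨rfl, by simp [pvBit] at hval; omega⟩
      rw [hcd.1, ih ds (fun x hx => hb x (by simp [hx])) (fun x hx => hb' x (by simp [hx])) hlen' hcd.2]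

theorem pvBits_isBits (n : Nat) : pvIsBits (pvBits n) := by
  induction n using Nat.strong_induction_on with
  | _ n ih =>
    rw [pvBits]
    split
    · intro c hc; simp at hc
    · rename_i h
      intro c hc
      rcases List.mem_append.mp hc with h' | h'
      · exact ih (n / 2) (Nat.div_lt_self (Nat.pos_of_ne_zero h) (by norm_num)) c h'
      · simp at h'; subst h'; split <;> simp

theorem pvBits_val (n : Nat) : pvVal (pvBits n) = n := by
  induction n using Nat.strong_induction_on with
  | _ n ih =>
    rw [pvBits]
    split
    · simp [pvVal]; omega
    · rename_i h
      rw [pvVal_append, ih (n / 2) (Nat.div_lt_self (Nat.pos_of_ne_zero h) (by norm_num))]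
      have h2 := Nat.mod_two_eq_zero_or_one n
      rcases h2 with h2 | h2 <;> simp [h2, pvVal, pvBit] <;> omega

theorem pvBits_length (n : Nat) : (pvBits n).length = PySem.Int.bitLength (n : Int) := by
  induction n using Nat.strong_induction_on with
  | _ n ih =>
    rw [pvBits]
    split
    · rename_i h; subst h; simp
    · rename_i h
      rw [PySem.Int.bitLength_natCast (Nat.pos_of_ne_zero h)]
      simp only [List.length_append, List.length_singleton]
      rw [ih (n / 2) (Nat.div_lt_self (Nat.pos_of_ne_zero h) (by norm_num))]

-- the bitLength of a nonzero Nat is ≥ 1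
theorem pvBitLength_pos (m : Nat) (hm : m ≠ 0) : 1 ≤ PySem.Int.bitLength (m : Int) := by
  by_contra hc
  have h0 : PySem.Int.bitLength (m : Int) = 0 := by omega
  have hlt := PySem.Int.lt_two_pow_bitLength (m : Int)
  rw [h0] at hlt
  simp [Int.natAbs_natCast] at hlt
  omega

theorem pvBinRep_isBits (n : Nat) : pvIsBits (pvBinRep n) := by
  unfold pvBinRep
  split
  · intro c hc; simp at hc; simp [hc]
  · exact pvBits_isBits n

theorem pvBinRep_val (n : Nat) : pvVal (pvBinRep n) = n := by
  unfold pvBinRep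
  split
  · rename_i h; subst h; simp [pvVal, pvBit]
  · exact pvBits_val n

theorem pvBinRep_length (n : Nat) :
    (pvBinRep n).length = max 1 (PySem.Int.bitLength (n : Int)) := by
  unfold pvBinRep
  split
  · rename_i h; subst h; simp
  · rename_i h
    rw [pvBits_length]
    have h1 : 1 ≤ PySem.Int.bitLength (n : Int) := pvBitLength_pos n h
    omega

-- bitLength bound: v < 2^k → bitLength v ≤ k (v : Nat)
theorem pvBitLength_le (v k : Nat) (h : v < 2 ^ k) : PySem.Int.bitLength (v : Int) ≤ k := by
  by_contra hc
  rw [not_le] at hc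
  rcases Nat.eq_zero_or_pos v with rfl | hv
  · simp at hc
  · have h2 := PySem.Int.two_pow_bitLength_le (v : Int) (by exact_mod_cast hv.ne')
    have h3 : (2 : Nat) ^ k ≤ 2 ^ (PySem.Int.bitLength (v : Int) - 1) :=
      Nat.pow_le_pow_right (by norm_num) (by omega)
    have h4 : 2 ^ (PySem.Int.bitLength (v : Int) - 1) ≤ v := by
      simpa [Int.natAbs_natCast] using h2
    omega

-- Nat.toDigitsCore characterisation on base 2
theorem pvToDigitsCore_eq : ∀ fuel n : Nat, 0 < n → n ≤ fuel → ∀ ds : List Char,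
    Nat.toDigitsCore 2 fuel n ds = pvBits n ++ ds := by
  intro fuel
  induction fuel with
  | zero => intro n hn hf; omega
  | succ fuel ih =>
    intro n hn hf ds
    rw [Nat.toDigitsCore]
    have hd : (n % 2).digitChar = (if n % 2 = 1 then '1' else '0') := by
      rcases Nat.mod_two_eq_zero_or_one n with h | h <;> simp [h, Nat.digitChar]
    by_cases h2 : n / 2 = 0
    · have hn1 : n = 1 := by omega
      subst hn1
      simp [pvBits, Nat.digitChar]
    · simp only [h2]
      rw [ih (n / 2) (Nat.pos_of_ne_zero h2) (by omega)]
      conv_rhs => rw [pvBits]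
      rw [dif_neg (by omega)]
      simp [hd]

theorem pvToBinChars_eq (v : Int) (hv : 0 ≤ v) :
    PySem.Int.toBinChars v = pvBinRep v.toNat := by
  unfold PySem.Int.toBinChars
  rw [if_neg (by omega)]
  unfold Nat.toDigits
  rcases Nat.eq_zero_or_pos v.toNat with h | h
  · rw [h]; simp [Nat.toDigitsCore, Nat.digitChar, pvBinRep]
  · rw [pvToDigitsCore_eq (v.toNat + 1) v.toNat h (by omega)]
    simp [pvBinRep, h.ne']

-- zfill on a sign-free string
theorem pvZfill_bits (cs : List Char) (w : Int) (h : pvIsBits cs) :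
    PySem.Chars.zfill cs w = List.replicate (w.toNat - cs.length) '0' ++ cs := by
  unfold PySem.Chars.zfill
  split
  · rename_i hle
    have : w.toNat - cs.length = 0 := by omega
    rw [this]
    simp
  · rename_i hgt
    cases cs with
    | nil => simp
    | cons c rest =>
      rcases h c (by simp) with rfl | rfl <;> simp

-- A's while-loop produces the canonical binary digits
theorem pvBinLoopA_eq (n : Nat) : ∀ acc : List Char,
    pvBinLoopA (n : Int) acc = pvBits n ++ acc := by
  induction n using Nat.strong_induction_on with
  | _ n ih =>
    intro acc
    rw [pvBinLoopA]
    by_cases h : n = 0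
    · subst h; simp [pvBits]
    · rw [if_pos (show (0 : Int) < (n : Int) by omega)]
      have hfd : PySem.Int.floordiv (n : Int) 2 = ((n / 2 : Nat) : Int) := by
        exact_mod_cast PySem.Int.floordiv_natCast n 2
      have hmd : PySem.Int.mod (n : Int) 2 = ((n % 2 : Nat) : Int) := by
        exact_mod_cast PySem.Int.mod_natCast n 2
      rw [hfd, hmd]
      have hchars : PySem.Int.toChars ((n % 2 : Nat) : Int) =
          [if n % 2 = 1 then '1' else '0'] := by
        rcases Nat.mod_two_eq_zero_or_one n with h2 | h2 <;> rw [h2] <;> rfl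
      rw [hchars, ih (n / 2) (Nat.div_lt_self (Nat.pos_of_ne_zero h) (by norm_num))]
      conv_rhs => rw [pvBits]
      rw [dif_neg h]
      simp

theorem pvFlip_val (cs : List Char) (h : pvIsBits cs) :
    pvVal (cs.map (fun el => if el == '0' then '1' else '0')) =
      2 ^ cs.length - 1 - pvVal cs := by
  induction cs with
  | nil => simp [pvVal]
  | cons c cs ih =>
    have hc := h c (by simp)
    have hrest : pvIsBits cs := fun x hx => h x (by simp [hx])
    have hlt := pvVal_lt cs
    have hpos : 0 < 2 ^ cs.length := pow_pos (by norm_num : (0:Nat) < 2) _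
    rcases hc with rfl | rfl
    · rw [List.map_cons, show ((if ('0' : Char) == '0' then '1' else '0') : Char) = '1' from rfl,
        pvVal_cons, pvVal_cons, ih hrest]
      simp only [List.length_map, List.length_cons, pow_succ,
        show pvBit '0' = 0 from rfl, show pvBit '1' = 1 from rfl]
      omega
    · rw [List.map_cons, show ((if ('1' : Char) == '0' then '1' else '0') : Char) = '0' from rfl,
        pvVal_cons, pvVal_cons, ih hrest]
      simp only [List.length_map, List.length_cons, pow_succ,
        show pvBit '0' = 0 from rfl, show pvBit '1' = 1 from rfl]
      omega

-- ===== VERDICT (by name: the statement is the Claim_ definition above) =====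
theorem to_binary_reverse_spec : Claim_equal_to_binary_reverse := by
  intro num nbd _
  unfold Spec_to_binary_reverse to_binary_reverse to_binary_reverse_alt pvToBinary
  set m : Nat := num.natAbs with hm
  have habs : |num| = (m : Int) := by rw [Int.abs_eq_natAbs]
  rw [habs]
  by_cases hm0 : m = 0
  · -- num = 0
    have hnum : num = 0 := by omega
    subst hnum
    simp only [hm0] at *
    rw [if_pos le_rfl, if_pos (by simp)]
    rw [pvBinLoopA_eq 0, pvBits]
    simp [pvZfill_bits [] nbd (by intro c hc; simp at hc)]
  · -- m > 0
    have hmpos : 0 < m := Nat.pos_of_ne_zero hm0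
    rw [if_neg (show ¬((m : Nat) : Int) = 0 by omega)]
    set k : Nat := PySem.Int.bitLength (m : Int) with hk
    have hk1 : 1 ≤ k := pvBitLength_pos m hm0
    have hmlt : m < 2 ^ k := by
      have := PySem.Int.lt_two_pow_bitLength (m : Int)
      simpa using this
    set L : Int := max nbd ((k : Nat) : Int) with hL
    have hLk : L.toNat = max nbd.toNat k := by
      rcases le_total nbd ((k : Nat) : Int) with h | h
      · rw [hL, max_eq_right h]; omega
      · rw [hL, max_eq_left h]; omega
    rw [pvBinLoopA_eq m, List.append_nil]
    have hbitsLen : (pvBits m).length = k := pvBits_length m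
    by_cases hsign : 0 ≤ num
    · -- positive: same digits, only possibly different (equal) padding
      simp only [if_pos hsign]
      rw [pvToBinChars_eq (m : Int) (by positivity)]
      have : ((m : Int)).toNat = m := by omega
      rw [this]
      have hrep : pvBinRep m = pvBits m := by unfold pvBinRep; rw [if_neg hm0]
      rw [hrep, pvZfill_bits _ nbd (pvBits_isBits m), pvZfill_bits _ L (pvBits_isBits m)]
      rw [hbitsLen]
      have hpad : nbd.toNat - k = L.toNat - k := by omega
      rw [hpad]
    · -- negative: A flips characters, B formats the integer complement
      simp only [if_neg hsign]
      rw [pvZfill_bits _ nbd (pvBits_isBits m)]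
      rw [PySem.List.foldl_append_singleton_eq_map]
      set v : Int := (1 : Int) <<< L.toNat - 1 - (m : Int) with hv
      have hpow : ((1 : Int) <<< L.toNat) = ((2 ^ L.toNat : Nat) : Int) := by
        rw [Int.shiftLeft_eq]
        push_cast
        ring
      have hkL : k ≤ L.toNat := by omega
      have hmltL : m < 2 ^ L.toNat := lt_of_lt_of_le hmlt (Nat.pow_le_pow_right (by norm_num) hkL)
      have hv0 : 0 ≤ v := by rw [hv, hpow]; omega
      have hvt : v.toNat = 2 ^ L.toNat - 1 - m := by rw [hv, hpow]; omega
      rw [pvToBinChars_eq v hv0, pvZfill_bits _ L (pvBinRep_isBits _)]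
      -- both sides: length-L.toNat bit strings of value 2^L - 1 - m
      refine congrArg String.mk ?_
      rw [List.nil_append]
      apply pvBits_unique
      · intro c hc
        rcases List.mem_map.mp hc with ⟨x, _, rfl⟩
        split <;> simp
      · intro c hc
        rcases List.mem_append.mp hc with h' | h'
        · simp at h'; simp [h'.2]
        · exact pvBinRep_isBits _ c h'
      · -- lengths
        have hlenc : (pvBinRep v.toNat).length ≤ L.toNat := by
          rw [pvBinRep_length]
          have hb := pvBitLength_le v.toNat L.toNat (by omega)
          omega
        simp only [List.length_map, List.length_append, List.length_replicate, hbitsLen]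
        omega
      · -- values
        rw [List.map_append, pvVal_append]
        simp only [List.length_map, hbitsLen]
        have hmapr : (List.replicate (nbd.toNat - k) '0').map
            (fun el => if el == '0' then '1' else '0') =
            List.replicate (nbd.toNat - k) '1' := by
          rw [List.map_replicate]; simp
        rw [hmapr, pvVal_replicate_one, pvFlip_val _ (pvBits_isBits m),
          pvBits_val, hbitsLen]
        rw [pvVal_append, pvVal_replicate_zero, pvBinRep_val, hvt]
        set p : Nat := nbd.toNat - k with hp
        have hLpk : L.toNat = p + k := by omega
        rw [hLpk, pow_add]
        have h1 : 0 < 2 ^ p := pow_pos (by norm_num : (0:Nat) < 2) _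
        have h2 : 0 < 2 ^ k := pow_pos (by norm_num : (0:Nat) < 2) _
        have hmul : (2 ^ p - 1) * 2 ^ k = 2 ^ p * 2 ^ k - 2 ^ k := by
          rw [Nat.sub_mul, one_mul]
        have h3 : 2 ^ k ≤ 2 ^ p * 2 ^ k := Nat.le_mul_of_pos_left _ h1
        omega
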